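-- pv_equiv track=rewrite | github.com/btr-supply/contracts | scripts/generate_deployer.py | should_include_selector
-- ===== SOURCE A (Python) =====
-- ACCESS_CONTROL_SELECTORS = [
--     "admin()",
--     "treasury()",
--     "getKeepers()",
--     "getManagers()",
--     "isAdmin(address)",
--     "isTreasury(address)",
--     "isKeeper(address)",
--     "isManager(address)",
--     "isBlacklisted(address)",
--     "isWhitelisted(address)",
--     "checkRole(bytes32)",
--     "checkRole(bytes32,address)",
--     "hasRole(bytes32,address)",
--     "grantRole(bytes32,address)",
--     "revokeRole(bytes32,address)",
--     "renounceRole(bytes32,address)"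
-- ]
--
-- PAUSE_SELECTORS = [
--     "isPaused()",
--     "isPaused(uint32)",
--     "pause()",
--     "pause(uint32)",
--     "unpause()",
--     "unpause(uint32)",
--     "paused()"
-- ]
--
-- TREASURY_SELECTORS = [
--     "getTreasury()",
--     "setTreasury(address)"
-- ]
--
-- LOUPE_SELECTORS = [
--     "supportsInterface(bytes4)"
-- ]
--
-- def get_excluded_selectors():
--     """Get selectors that should be excluded from certain facets"""
--     # Each facet has its own excluded selectors
--     return {
--         "AccessControlFacet": [],  # No exclusions for AccessControlFacet
--         "ManagementFacet": [], # No exclusions for ManagementFacet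
--         "ALL_OTHERS": ACCESS_CONTROL_SELECTORS + PAUSE_SELECTORS  # All other facets exclude these selectors
--     }
--
-- def get_permissioned_facet_selectors():
--     """Get selectors that should only be included in specific facets"""
--     return {
--         "AccessControlFacet": ACCESS_CONTROL_SELECTORS,
--         "ManagementFacet": PAUSE_SELECTORS,
--         "DiamondLoupeFacet": LOUPE_SELECTORS,
--         "TreasuryFacet": TREASURY_SELECTORS
--     }
--
-- def should_include_selector(facet_name, selector_name):
--     """Determine if a selector should be included in a facet"""
--     excluded_selectors = get_excluded_selectors()
--     permissioned_selectors = get_permissioned_facet_selectors()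
--
--     # Check if this is a permissioned selector that should only be in specific facets
--     for facet, selectors in permissioned_selectors.items():
--         if selector_name in selectors:
--             # If this selector is permissioned to a specific facet,
--             # only include it in that facet
--             return facet_name == facet
--
--     # Check if this selector is excluded for this facet
--     if facet_name in excluded_selectors and selector_name in excluded_selectors[facet_name]:
--         return False
--
--     # Check if this selector is excluded for all other facets except specific ones
--     if facet_name not in ["AccessControlFacet", "ManagementFacet"] and selector_name in excluded_selectors["ALL_OTHERS"]:
--         return False
--
--     return True
-- ===== SOURCE B (Python) =====
-- ACCESS_CONTROL_SELECTORS = [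
--     "admin()",
--     "treasury()",
--     "getKeepers()",
--     "getManagers()",
--     "isAdmin(address)",
--     "isTreasury(address)",
--     "isKeeper(address)",
--     "isManager(address)",
--     "isBlacklisted(address)",
--     "isWhitelisted(address)",
--     "checkRole(bytes32)",
--     "checkRole(bytes32,address)",
--     "hasRole(bytes32,address)",
--     "grantRole(bytes32,address)",
--     "revokeRole(bytes32,address)",
--     "renounceRole(bytes32,address)"
-- ]
--
-- PAUSE_SELECTORS = [
--     "isPaused()",
--     "isPaused(uint32)",
--     "pause()",
--     "pause(uint32)",
--     "unpause()",
--     "unpause(uint32)",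
--     "paused()"
-- ]
--
-- TREASURY_SELECTORS = [
--     "getTreasury()",
--     "setTreasury(address)"
-- ]
--
-- LOUPE_SELECTORS = [
--     "supportsInterface(bytes4)"
-- ]
--
-- # Reverse index: every permissioned selector -> its owning facet (lists are disjoint).
-- _OWNER = {
--     sel: facet
--     for facet, sels in {
--         "AccessControlFacet": ACCESS_CONTROL_SELECTORS,
--         "ManagementFacet": PAUSE_SELECTORS,
--         "DiamondLoupeFacet": LOUPE_SELECTORS,
--         "TreasuryFacet": TREASURY_SELECTORS,
--     }.items()
--     for sel in sels
-- }
--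
-- def should_include_selector(facet_name, selector_name):
--     """A selector is included everywhere unless it is owned by a specific facet."""
--     owner = _OWNER.get(selector_name)
--     if owner is None:
--         return True
--     return facet_name == owner
-- ===== Notes on version B (the rewrite author's own statement) =====
-- stated objective: simpler
-- what changed: Replaces the per-call scan over four facet->selector lists plus two exclusion branches (provably dead, since every ALL_OTHERS selector is already caught by the permissioned loop and the two named facets have empty exclusion lists) by one precomputed reverse index selector->owning-facet and a single dict lookup.
import Mathlib
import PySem

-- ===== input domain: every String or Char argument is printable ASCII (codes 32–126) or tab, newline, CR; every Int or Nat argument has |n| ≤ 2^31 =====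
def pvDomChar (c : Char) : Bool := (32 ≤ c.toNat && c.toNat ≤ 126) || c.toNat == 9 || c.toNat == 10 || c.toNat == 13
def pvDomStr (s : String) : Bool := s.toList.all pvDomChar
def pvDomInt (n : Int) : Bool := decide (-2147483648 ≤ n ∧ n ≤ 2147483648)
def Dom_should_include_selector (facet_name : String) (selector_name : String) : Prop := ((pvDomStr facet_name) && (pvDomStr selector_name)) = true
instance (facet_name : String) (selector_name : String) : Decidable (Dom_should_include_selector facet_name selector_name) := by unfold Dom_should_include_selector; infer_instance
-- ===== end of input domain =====

-- B replaces A's facet-by-facet scan (and its two dead exclusion branches) by a precomputed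
-- reverse index selector -> owning facet with a single lookup; objective: simpler.

-- ===== PORT A =====
def pvACCESS : List String := [
  "admin()", "treasury()", "getKeepers()", "getManagers()",
  "isAdmin(address)", "isTreasury(address)", "isKeeper(address)", "isManager(address)",
  "isBlacklisted(address)", "isWhitelisted(address)",
  "checkRole(bytes32)", "checkRole(bytes32,address)", "hasRole(bytes32,address)",
  "grantRole(bytes32,address)", "revokeRole(bytes32,address)", "renounceRole(bytes32,address)"]

def pvPAUSE : List String := [
  "isPaused()", "isPaused(uint32)", "pause()", "pause(uint32)",
  "unpause()", "unpause(uint32)", "paused()"]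

def pvTREASURY : List String := ["getTreasury()", "setTreasury(address)"]

def pvLOUPE : List String := ["supportsInterface(bytes4)"]

-- get_excluded_selectors() as an insertion-ordered association list
def pvExcluded : List (String × List String) :=
  [("AccessControlFacet", []), ("ManagementFacet", []), ("ALL_OTHERS", pvACCESS ++ pvPAUSE)]

-- get_permissioned_facet_selectors()
def pvPermissioned : List (String × List String) :=
  [("AccessControlFacet", pvACCESS), ("ManagementFacet", pvPAUSE),
   ("DiamondLoupeFacet", pvLOUPE), ("TreasuryFacet", pvTREASURY)]

-- the 'for facet, selectors in permissioned_selectors.items(): … return …' loop (early return = some)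
def pvPermLoop (facet_name selector_name : String) : List (String × List String) → Option Bool
  | [] => none
  | (facet, sels) :: rest =>
      if sels.contains selector_name then some (facet_name == facet)
      else pvPermLoop facet_name selector_name rest

def should_include_selector (facet_name : String) (selector_name : String) : Bool :=
  match pvPermLoop facet_name selector_name pvPermissioned with
  | some b => b
  | none =>
    -- if facet_name in excluded_selectors and selector_name in excluded_selectors[facet_name]
    if (match pvExcluded.find? (fun p => p.1 == facet_name) with
        | some p => p.2.contains selector_name
        | none => false) then false
    -- if facet_name not in [...] and selector_name in excluded_selectors["ALL_OTHERS"]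
    else if !(["AccessControlFacet", "ManagementFacet"].contains facet_name)
            && ((match pvExcluded.find? (fun p => p.1 == "ALL_OTHERS") with
                 | some p => p.2.contains selector_name
                 | none => false)) then false
    else true

-- ===== PORT B =====
-- the dict comprehension {sel: facet for facet, sels in permissioned.items() for sel in sels}
def pvOwner : List (String × String) :=
  pvPermissioned.flatMap (fun p => p.2.map (fun sel => (sel, p.1)))

def should_include_selector_alt (facet_name : String) (selector_name : String) : Bool :=
  match pvOwner.find? (fun p => p.1 == selector_name) with
  | none => true
  | some p => facet_name == p.2

-- ===== PRECONDITION & SPEC =====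
def Spec_should_include_selector (facet_name : String) (selector_name : String) (out : Bool) : Prop := out = should_include_selector_alt facet_name selector_name
instance (facet_name : String) (selector_name : String) (out : Bool) : Decidable (Spec_should_include_selector facet_name selector_name out) := by unfold Spec_should_include_selector; infer_instance

-- ===== CLAIM (what is proved, stated in full; the proofs are below) =====
def Claim_equal_should_include_selector : Prop := ∀ (facet_name : String) (selector_name : String), Dom_should_include_selector facet_name selector_name → Spec_should_include_selector facet_name selector_name (should_include_selector facet_name selector_name)

-- ===== LEMMAS AND PROOFS =====

-- find? over one block of the flattened reverse index
theorem pv_find_block (sels : List String) (facet : String) (rest : List (String × String)) (s : String) :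
    ((sels.map (fun sel => (sel, facet))) ++ rest).find? (fun p => p.1 == s)
      = if sels.contains s then some (s, facet) else rest.find? (fun p => p.1 == s) := by
  induction sels with
  | nil => simp
  | cons x xs ih =>
    by_cases hx : x = s
    · subst hx; simp
    · simp [ih, beq_iff_eq, hx, Ne.symm hx]

theorem should_include_selector_eq_alt (facet_name selector_name : String) :
    should_include_selector facet_name selector_name
      = should_include_selector_alt facet_name selector_name := by
  have howner : pvOwner.find? (fun p => p.1 == selector_name)
      = if pvACCESS.contains selector_name then some (selector_name, "AccessControlFacet")
        else if pvPAUSE.contains selector_name then some (selector_name, "ManagementFacet")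
        else if pvLOUPE.contains selector_name then some (selector_name, "DiamondLoupeFacet")
        else if pvTREASURY.contains selector_name then some (selector_name, "TreasuryFacet")
        else none := by
    have hflat : pvOwner =
        (pvACCESS.map (fun sel => (sel, "AccessControlFacet"))) ++
         ((pvPAUSE.map (fun sel => (sel, "ManagementFacet"))) ++
          ((pvLOUPE.map (fun sel => (sel, "DiamondLoupeFacet"))) ++
           ((pvTREASURY.map (fun sel => (sel, "TreasuryFacet"))) ++ []))) := by
      simp [pvOwner, pvPermissioned]
    rw [hflat, pv_find_block, pv_find_block, pv_find_block, pv_find_block]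
    simp
  cases h1 : pvACCESS.contains selector_name <;>
  cases h2 : pvPAUSE.contains selector_name <;>
  cases h3 : pvLOUPE.contains selector_name <;>
  cases h4 : pvTREASURY.contains selector_name <;>
    simp only [should_include_selector, should_include_selector_alt, howner,
      pvPermLoop, pvPermissioned, h1, h2, h3, h4, if_true, if_false,
      Bool.false_eq_true, ite_true, ite_false] <;>
    try rfl
  -- remaining case: selector in none of the four lists; A's exclusion branches are dead
  · have hboth : (pvACCESS ++ pvPAUSE).contains selector_name = false := by
      simp only [List.contains_append, h1, h2, Bool.or_self]
    have hn1 : selector_name ∉ pvACCESS := by simpa using h1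
    have hn2 : selector_name ∉ pvPAUSE := by simpa using h2
    by_cases hf1 : facet_name = "AccessControlFacet"
    · subst hf1; simp [pvExcluded, hn1, hn2]
    · by_cases hf2 : facet_name = "ManagementFacet"
      · subst hf2; simp [pvExcluded, hn1, hn2]
      · by_cases hf3 : facet_name = "ALL_OTHERS"
        · subst hf3; simp [pvExcluded, hn1, hn2]
        · simp [pvExcluded, hn1, hn2, beq_iff_eq, hf1, hf2, Ne.symm hf1, Ne.symm hf2, Ne.symm hf3]

-- ===== VERDICT (by name: the statement is the Claim_ definition above) =====
theorem should_include_selector_spec : Claim_equal_should_include_selector := by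
  intro facet_name selector_name _
  exact should_include_selector_eq_alt facet_name selector_name
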